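-- pv_equiv track=rewrite | github.com/hochoa13/Asistente-Harlest | tools/session_search_tool.py | _truncate_around_matches
-- ===== SOURCE A (Python) =====
-- MAX_SESSION_CHARS = 100_000
--
-- def _truncate_around_matches(
--     full_text: str, query: str, max_chars: int = MAX_SESSION_CHARS
-- ) -> str:
--     """
--     Trunca una transcripción de conversación a max_chars, centrada alrededor
--     de donde aparecen los términos de consulta. Mantiene contenido cerca de coincidencias, recorta los bordes.
--     """
--     if len(full_text) <= max_chars:
--         return full_text
--
--     # Encuentra la primera ocurrencia de cualquier término de consulta
--     query_terms = query.lower().split()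
--     text_lower = full_text.lower()
--     first_match = len(full_text)
--     for term in query_terms:
--         pos = text_lower.find(term)
--         if pos != -1 and pos < first_match:
--             first_match = pos
--
--     if first_match == len(full_text):
--         # No se encontró coincidencia, toma desde el inicio
--         first_match = 0
--
--     # Centra la ventana alrededor de la primera coincidencia
--     half = max_chars // 2
--     start = max(0, first_match - half)
--     end = min(len(full_text), start + max_chars)
--     if end - start < max_chars:
--         start = max(0, end - max_chars)
--
--     truncated = full_text[start:end]
--     prefix = "...[conversación anterior truncada]...\n\n" if start > 0 else ""
--     suffix = "\n\n...[conversación posterior truncada]..." if end < len(full_text) else ""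
--     return prefix + truncated + suffix
-- ===== SOURCE B (Python) =====
-- MAX_SESSION_CHARS = 100_000
--
-- def _truncate_around_matches(full_text, query, max_chars=MAX_SESSION_CHARS):
--     if len(full_text) <= max_chars:
--         return full_text
--     terms = query.lower().split()
--     text_lower = full_text.lower()
--     n = len(full_text)
--     # one left-to-right scan: first position where any term matches (0 if none)
--     first_match = next(
--         (i for i in range(n) if any(text_lower.startswith(t, i) for t in terms)),
--         0,
--     )
--     half = max_chars // 2
--     start = max(0, min(first_match - half, n - max_chars))
--     end = min(n, start + max_chars)
--     truncated = full_text[start:end]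
--     prefix = "...[conversación anterior truncada]...\n\n" if start > 0 else ""
--     suffix = "\n\n...[conversación posterior truncada]..." if end < n else ""
--     return prefix + truncated + suffix
-- ===== Notes on version B (the rewrite author's own statement) =====
-- stated objective: alternative
-- what changed: Replaces the per-term loop of full text_lower.find scans (plus the first_match==len sentinel fallback) by a single left-to-right scan of the text that returns the first position where any query term matches (next(...) with default 0), and replaces the two-step start/end adjustment by the closed form start = max(0, min(first_match - half, n - max_chars)).
import Mathlib
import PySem

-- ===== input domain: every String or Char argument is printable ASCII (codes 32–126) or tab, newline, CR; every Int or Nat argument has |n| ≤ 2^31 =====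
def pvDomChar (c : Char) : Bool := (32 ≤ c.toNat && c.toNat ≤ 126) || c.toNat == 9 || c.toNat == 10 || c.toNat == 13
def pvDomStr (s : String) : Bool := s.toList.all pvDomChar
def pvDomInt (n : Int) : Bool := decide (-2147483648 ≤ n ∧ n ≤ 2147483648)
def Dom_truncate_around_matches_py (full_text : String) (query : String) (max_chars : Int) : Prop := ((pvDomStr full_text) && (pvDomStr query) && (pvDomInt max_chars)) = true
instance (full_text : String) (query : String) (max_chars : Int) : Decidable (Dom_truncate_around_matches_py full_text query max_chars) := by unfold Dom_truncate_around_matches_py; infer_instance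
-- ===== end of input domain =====

-- B replaces A's per-term find-and-minimise loop (with its len-sentinel fallback) by a single
-- left-to-right scan for the first matching position, and the two-step window adjustment by a
-- closed-form start; alternative decomposition, same observable behaviour.


-- ===== PORT A =====
def truncate_around_matches_py (full_text : String) (query : String) (max_chars : Int) : String :=
  if PySem.Str.len full_text ≤ max_chars then full_text
  else
    let query_terms := PySem.Str.split₀ (PySem.Str.lower query)
    let text_lower := PySem.Str.lower full_text
    let n := PySem.Str.len full_text
    let first_match := query_terms.foldl
      (fun fm term =>
        let pos := PySem.Str.find text_lower term
        if pos ≠ -1 ∧ pos < fm then pos else fm) n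
    let first_match := if first_match = n then 0 else first_match
    let half := PySem.Int.floordiv max_chars 2
    let start := max 0 (first_match - half)
    let stop := min n (start + max_chars)
    let start := if stop - start < max_chars then max 0 (stop - max_chars) else start
    let truncated := PySem.Str.slice full_text (some start) (some stop)
    let pre := if start > 0 then "...[conversación anterior truncada]...\n\n" else ""
    let suf := if stop < n then "\n\n...[conversación posterior truncada]..." else ""
    pre ++ truncated ++ suf

-- ===== PORT B =====
-- B's generator scan: first index (counting from `i`) whose suffix starts with some term
def pvAltScan (terms : List String) (cs : List Char) (i : Int) : Option Int :=
  match cs with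
  | [] => none
  | c :: rest =>
      if terms.any (fun t => PySem.Chars.startswith (c :: rest) t.toList) then some i
      else pvAltScan terms rest (i + 1)

def truncate_around_matches_py_alt (full_text : String) (query : String) (max_chars : Int) : String :=
  if PySem.Str.len full_text ≤ max_chars then full_text
  else
    let terms := PySem.Str.split₀ (PySem.Str.lower query)
    let text_lower := PySem.Str.lower full_text
    let n := PySem.Str.len full_text
    let first_match := (pvAltScan terms text_lower.toList 0).getD 0
    let half := PySem.Int.floordiv max_chars 2
    let start := max 0 (min (first_match - half) (n - max_chars))
    let stop := min n (start + max_chars)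
    let truncated := PySem.Str.slice full_text (some start) (some stop)
    let pre := if start > 0 then "...[conversación anterior truncada]...\n\n" else ""
    let suf := if stop < n then "\n\n...[conversación posterior truncada]..." else ""
    pre ++ truncated ++ suf

-- ===== PRECONDITION & SPEC =====
def Spec_truncate_around_matches_py (full_text : String) (query : String) (max_chars : Int) (out : String) : Prop := out = truncate_around_matches_py_alt full_text query max_chars
instance (full_text : String) (query : String) (max_chars : Int) (out : String) : Decidable (Spec_truncate_around_matches_py full_text query max_chars out) := by unfold Spec_truncate_around_matches_py; infer_instance

-- ===== CLAIM (what is proved, stated in full; the proofs are below) =====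
def Claim_equal_truncate_around_matches_py : Prop := ∀ (full_text : String) (query : String) (max_chars : Int), Dom_truncate_around_matches_py full_text query max_chars → Spec_truncate_around_matches_py full_text query max_chars (truncate_around_matches_py full_text query max_chars)

-- ===== LEMMAS AND PROOFS =====

-- A's fold step (definitionally equal to the lambda in port A when cs = text_lower.toList)
def pvStep (cs : List Char) (fm : Int) (term : String) : Int :=
  if PySem.Chars.find cs term.toList ≠ -1 ∧ PySem.Chars.find cs term.toList < fm then
    PySem.Chars.find cs term.toList
  else fm

-- "some term matches at position k of cs"
def pvM (terms : List String) (cs : List Char) (k : Nat) : Prop :=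
  ∃ t ∈ terms, t.toList <+: cs.drop k

-- the final window pair of each port, as a function of the shared pieces
def pvPairA (cs : List Char) (terms : List String) (n m : Int) : Int × Int :=
  let fm0 := terms.foldl (pvStep cs) n
  let fm := if fm0 = n then 0 else fm0
  let half := PySem.Int.floordiv m 2
  let start := max 0 (fm - half)
  let stop := min n (start + m)
  (if stop - start < m then max 0 (stop - m) else start, stop)

def pvPairB (cs : List Char) (terms : List String) (n m : Int) : Int × Int :=
  let fm := (pvAltScan terms cs 0).getD 0
  let half := PySem.Int.floordiv m 2
  let start := max 0 (min (fm - half) (n - m))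
  (start, min n (start + m))

-- the shared prefix/slice/suffix rendering of a window pair
def pvRender (full_text : String) (n : Int) (p : Int × Int) : String :=
  (if p.1 > 0 then "...[conversación anterior truncada]...\n\n" else "") ++
  PySem.Str.slice full_text (some p.1) (some p.2) ++
  (if p.2 < n then "\n\n...[conversación posterior truncada]..." else "")

lemma pvAltScan_none (terms : List String) (cs : List Char) (i : Int)
    (h : ∀ k < cs.length, ¬ pvM terms cs k) : pvAltScan terms cs i = none := by
  induction cs generalizing i with
  | nil => rfl
  | cons c rest ih =>
      simp only [pvAltScan]
      rw [if_neg, ih]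
      · intro k hk hM
        obtain ⟨t, ht, hp⟩ := hM
        exact h (k + 1) (by simpa using hk) ⟨t, ht, by simpa using hp⟩
      · intro hany
        obtain ⟨t, ht, hsw⟩ := List.any_eq_true.mp hany
        exact h 0 (by simp) ⟨t, ht, by simpa using (PySem.Chars.startswith_iff _ _).mp hsw⟩

lemma pvAltScan_some (terms : List String) (cs : List Char) (i : Int) (k : Nat)
    (hk : k < cs.length) (hM : pvM terms cs k) (hmin : ∀ k' < k, ¬ pvM terms cs k') :
    pvAltScan terms cs i = some (i + k) := by
  induction cs generalizing i k with
  | nil => simp at hk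
  | cons c rest ih =>
      simp only [pvAltScan]
      cases k with
      | zero =>
          obtain ⟨t, ht, hp⟩ := hM
          have hany : (terms.any fun t => PySem.Chars.startswith (c :: rest) t.toList) = true :=
            List.any_eq_true.mpr ⟨t, ht, (PySem.Chars.startswith_iff _ _).mpr (by simpa using hp)⟩
          simp only [if_pos hany]
          simp
      | succ k' =>
          rw [if_neg, ih (i + 1) k' (by simpa using hk)]
          · simp only [Option.some.injEq]; push_cast; omega
          · obtain ⟨t, ht, hp⟩ := hM
            exact ⟨t, ht, by simpa using hp⟩
          · intro j hj hMj
            obtain ⟨t, ht, hp⟩ := hMj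
            exact hmin (j + 1) (by omega) ⟨t, ht, by simpa using hp⟩
          · intro hany
            obtain ⟨t, ht, hsw⟩ := List.any_eq_true.mp hany
            exact hmin 0 (by omega) ⟨t, ht, by simpa using (PySem.Chars.startswith_iff _ _).mp hsw⟩

lemma pvAltScan_bounds (terms : List String) (cs : List Char) (i j : Int)
    (h : pvAltScan terms cs i = some j) : i ≤ j ∧ j < i + cs.length := by
  induction cs generalizing i with
  | nil => simp [pvAltScan] at h
  | cons c rest ih =>
      simp only [pvAltScan] at h
      split_ifs at h with hc
      · cases h; simp only [List.length_cons]; push_cast; omega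
      · obtain ⟨ha, hb⟩ := ih (i + 1) h
        simp only [List.length_cons] at *
        push_cast at hb ⊢
        omega

lemma pvAltScan_getD_bounds (terms : List String) (cs : List Char) :
    0 ≤ (pvAltScan terms cs 0).getD 0 ∧ (pvAltScan terms cs 0).getD 0 ≤ (cs.length : Int) := by
  rcases hsc : pvAltScan terms cs 0 with _ | j
  · simp
  · obtain ⟨ha, hb⟩ := pvAltScan_bounds terms cs 0 j hsc
    simp only [Option.getD_some]
    omega

-- A's fold: invariant (result is the old value or a realised find, never grows, lower bound on found terms)
lemma pvFold_spec (cs : List Char) (terms : List String) :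
    ∀ acc : Int, 0 ≤ acc →
      (terms.foldl (pvStep cs) acc = acc ∨
        (0 ≤ terms.foldl (pvStep cs) acc ∧
          ∃ t ∈ terms, PySem.Chars.find cs t.toList = terms.foldl (pvStep cs) acc)) ∧
      terms.foldl (pvStep cs) acc ≤ acc ∧
      ∀ t ∈ terms, PySem.Chars.find cs t.toList ≠ -1 →
        terms.foldl (pvStep cs) acc ≤ PySem.Chars.find cs t.toList := by
  induction terms with
  | nil => intro acc hacc; exact ⟨Or.inl rfl, le_refl _, by simp⟩
  | cons t ts ih =>
      intro acc hacc
      rw [List.foldl_cons]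
      have hstep : pvStep cs acc t =
          if PySem.Chars.find cs t.toList ≠ -1 ∧ PySem.Chars.find cs t.toList < acc then
            PySem.Chars.find cs t.toList else acc := rfl
      by_cases hc : PySem.Chars.find cs t.toList ≠ -1 ∧ PySem.Chars.find cs t.toList < acc
      · rw [hstep, if_pos hc]
        have hpos : 0 ≤ PySem.Chars.find cs t.toList := by
          have := PySem.Chars.neg_one_le_find cs t.toList; omega
        obtain ⟨h1, h2, h3⟩ := ih (PySem.Chars.find cs t.toList) hpos
        refine ⟨?_, by omega, ?_⟩
        · rcases h1 with h | ⟨hr, u, hu, hf⟩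
          · exact Or.inr ⟨by omega, t, by simp, h.symm ▸ h⟩
          · exact Or.inr ⟨hr, u, by simp [hu], hf⟩
        · intro u hu hune
          rcases List.mem_cons.mp hu with h | h
          · subst h; omega
          · exact h3 u h hune
      · rw [hstep, if_neg hc]
        obtain ⟨h1, h2, h3⟩ := ih acc hacc
        refine ⟨?_, h2, ?_⟩
        · rcases h1 with h | ⟨hr, u, hu, hf⟩
          · exact Or.inl h
          · exact Or.inr ⟨hr, u, by simp [hu], hf⟩
        · intro u hu hune
          rcases List.mem_cons.mp hu with h | h
          · subst h
            have h' := PySem.Chars.neg_one_le_find cs u.toList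
            rw [not_and_or] at hc
            rcases hc with hc | hc
            · exact absurd hune (by simpa using hc)
            · omega
          · exact h3 u h hune

-- if some term is a prefix at k, that term's find is ≥ 0 and ≤ k
lemma pvFind_le_of_prefix (cs : List Char) (t : List Char) (k : Nat) (hp : t <+: cs.drop k) :
    0 ≤ PySem.Chars.find cs t ∧ PySem.Chars.find cs t ≤ (k : Int) := by
  have hinf : t <:+: cs := hp.isInfix.trans (List.drop_suffix k cs).isInfix
  have hne : PySem.Chars.find cs t ≠ -1 := (PySem.Chars.find_ne_neg_one_iff cs t).mpr hinf
  have hge : 0 ≤ PySem.Chars.find cs t := by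
    have := PySem.Chars.neg_one_le_find cs t; omega
  refine ⟨hge, ?_⟩
  have hspec := PySem.Chars.find_spec hge
  by_contra hgt
  exact hspec.2 k (by omega) hp

-- core: A's first_match (fold + sentinel fallback) equals B's scan with default 0
lemma pvFM_eq (cs : List Char) (terms : List String) :
    (if terms.foldl (pvStep cs) (cs.length : Int) = (cs.length : Int) then 0
     else terms.foldl (pvStep cs) (cs.length : Int))
    = (pvAltScan terms cs 0).getD 0 := by
  obtain ⟨h1, h2, h3⟩ := pvFold_spec cs terms (cs.length : Int) (by positivity)
  set fA := terms.foldl (pvStep cs) (cs.length : Int) with hfA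
  by_cases hA : fA = (cs.length : Int)
  · rw [if_pos hA]
    rw [pvAltScan_none terms cs 0 ?_]
    · rfl
    · intro k hk hM
      obtain ⟨t, ht, hp⟩ := hM
      obtain ⟨hge, hle⟩ := pvFind_le_of_prefix cs t.toList k hp
      have := h3 t ht (by omega)
      omega
  · rw [if_neg hA]
    rcases h1 with h | ⟨hr, t, ht, hf⟩
    · exact absurd h hA
    · have hlt : fA < (cs.length : Int) := lt_of_le_of_ne h2 hA
      have hspec := PySem.Chars.find_spec (hf ▸ hr)
      rw [hf] at hspec
      have hsc : pvAltScan terms cs 0 = some ((0 : Int) + fA.toNat) := by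
        apply pvAltScan_some
        · omega
        · exact ⟨t, ht, hspec.1⟩
        · intro k' hk' hM
          obtain ⟨u, hu, hp⟩ := hM
          obtain ⟨hge, hle⟩ := pvFind_le_of_prefix cs u.toList k' hp
          have := h3 u hu (by omega)
          omega
      rw [hsc, Option.getD_some]
      omega

-- window arithmetic: A's two-step start/stop equals B's closed form (any half)
lemma pvWindow_eq (F half m n : Int) (h0 : 0 ≤ F) (hF : F ≤ n) (hm : m < n) :
    ((if min n (max 0 (F - half) + m) - max 0 (F - half) < m
        then max 0 (min n (max 0 (F - half) + m) - m) else max 0 (F - half)),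
      min n (max 0 (F - half) + m))
    = (max 0 (min (F - half) (n - m)),
       min n (max 0 (min (F - half) (n - m)) + m)) := by
  simp only [Prod.mk.injEq]
  constructor <;> omega

lemma pvPair_eq (cs : List Char) (terms : List String) (n m : Int)
    (hn : n = (cs.length : Int)) (hm : m < n) :
    pvPairA cs terms n m = pvPairB cs terms n m := by
  subst hn
  simp only [pvPairA, pvPairB]
  rw [pvFM_eq cs terms]
  obtain ⟨h0, hF⟩ := pvAltScan_getD_bounds terms cs
  exact pvWindow_eq _ _ m _ h0 hF hm

-- ===== VERDICT (by name: the statement is the Claim_ definition above) =====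
theorem truncate_around_matches_py_spec : Claim_equal_truncate_around_matches_py := by
  intro full_text query max_chars _
  unfold Spec_truncate_around_matches_py truncate_around_matches_py truncate_around_matches_py_alt
  by_cases hle : PySem.Str.len full_text ≤ max_chars
  · simp only [if_pos hle]
  · simp only [if_neg hle]
    show pvRender full_text (PySem.Str.len full_text)
          (pvPairA (PySem.Str.lower full_text).toList (PySem.Str.split₀ (PySem.Str.lower query))
            (PySem.Str.len full_text) max_chars)
        = pvRender full_text (PySem.Str.len full_text)
          (pvPairB (PySem.Str.lower full_text).toList (PySem.Str.split₀ (PySem.Str.lower query))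
            (PySem.Str.len full_text) max_chars)
    refine congrArg (pvRender full_text (PySem.Str.len full_text)) (pvPair_eq _ _ _ _ ?_ ?_)
    · simp [PySem.Str.toList_lower, PySem.Chars.lower]
    · exact not_le.mp hle
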